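-- pv_equiv track=rewrite | github.com/kabirbuch/Random | Girls_vs_Boys.py | kidgenerator
-- ===== SOURCE A (Python) =====
-- def countusage(childlist: str) -> tuple:
--     """
--     Given an ordering of children, how many girls are there and how many boys?
--     """
--     g_used: int = 0
--     b_used: int = 0
--     for kid in childlist:
--         if kid == "G":
--             g_used += 1
--         else:
--             b_used += 1
--     return (g_used, b_used)
--
-- def kidgenerator(n: int) -> list:
--     """
--     If a couple has exactly n kids and stops at any point in which they have
--     more girls than boys, what orderings of girls and boys could they have?
--     """
--     working: list[str] = []
--     possibilities: list[str] = [""]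
--
--     for a in range(n):
--         for possibility in possibilities:
--             g_used, b_used = countusage(possibility)
--             g_available: int = (n // 2) + 1 - b_used
--             b_available: int = n // 2 - b_used
--             if b_available:
--                 working.append(possibility + "B")
--             if (g_available and g_used < b_used) or a == n - 1:
--                 working.append(possibility + "G")
--         possibilities = working
--         working = []
--
--     return possibilities
-- ===== SOURCE B (Python) =====
-- def kidgenerator(n: int) -> list:
--     """
--     If a couple has exactly n kids and stops at any point in which they have
--     more girls than boys, what orderings of girls and boys could they have?
--     """
--     half = n // 2
--     results: list[str] = []
--     # depth-first backtracking with an explicit stack of (prefix, g_used, b_used);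
--     # "G" is pushed before "B" so the LIFO pop explores "B" first.
--     stack: list[tuple[str, int, int]] = [("", 0, 0)]
--     while stack:
--         prefix, g_used, b_used = stack.pop()
--         a = len(prefix)
--         if a >= n:
--             results.append(prefix)
--             continue
--         if (half + 1 - b_used and g_used < b_used) or a == n - 1:
--             stack.append((prefix + "G", g_used + 1, b_used))
--         if half - b_used:
--             stack.append((prefix + "B", g_used, b_used + 1))
--     return results
-- ===== Notes on version B (the rewrite author's own statement) =====
-- stated objective: alternative
-- what changed: Replaces A's breadth-first level-by-level rebuild (which recounts every prefix's girls/boys with countusage at each of the n levels and materialises each intermediate level list) with recursive depth-first backtracking that threads the two counters along, emitting complete orderings directly in the same left-to-right order.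
import Mathlib
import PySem

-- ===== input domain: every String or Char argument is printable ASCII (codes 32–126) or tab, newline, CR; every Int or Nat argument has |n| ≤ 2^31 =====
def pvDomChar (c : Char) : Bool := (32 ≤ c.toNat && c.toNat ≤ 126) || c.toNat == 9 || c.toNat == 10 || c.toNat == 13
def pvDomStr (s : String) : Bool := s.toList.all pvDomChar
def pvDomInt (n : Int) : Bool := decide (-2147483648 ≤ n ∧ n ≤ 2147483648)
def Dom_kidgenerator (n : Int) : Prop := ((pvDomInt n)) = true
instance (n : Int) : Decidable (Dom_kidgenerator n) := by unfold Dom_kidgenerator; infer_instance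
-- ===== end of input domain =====

-- B replaces A's breadth-first level-by-level rebuild (recounting every prefix with countusage at
-- each level) with explicit-stack depth-first backtracking that carries the two counters along
-- (objective: alternative).

-- ===== PORT A =====
def countusage (childlist : String) : Int × Int :=
  childlist.toList.foldl
    (fun (st : Int × Int) kid => if kid = 'G' then (st.1 + 1, st.2) else (st.1, st.2 + 1))
    (0, 0)

def kidgenerator (n : Int) : List String :=
  (PySem.List.pyRange 0 n 1).foldl
    (fun possibilities a =>
      possibilities.foldl
        (fun working possibility =>
          let gb := countusage possibility
          let g_available : Int := PySem.Int.floordiv n 2 + 1 - gb.2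
          let b_available : Int := PySem.Int.floordiv n 2 - gb.2
          let working := if b_available ≠ 0 then working ++ [possibility ++ "B"] else working
          if (g_available ≠ 0 ∧ gb.1 < gb.2) ∨ a = n - 1 then working ++ [possibility ++ "G"]
          else working)
        [])
    [""]

-- ===== PORT B =====
-- weight of a stack entry, used only as the termination measure of the while loop
def kidWt (n : Int) (e : List Char × Int × Int) : Nat := 3 ^ (n - e.1.length).toNat

-- Source B's while loop over the explicit stack; the Python string prefix is carried as its
-- List Char, turned back into a String when a complete ordering is appended to results.
def kidLoop (n : Int) (stack : List (List Char × Int × Int)) (results : List String) : List String :=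
  match stack with
  | [] => results
  | (pfx, g_used, b_used) :: rest =>
    if (pfx.length : Int) ≥ n then kidLoop n rest (results ++ [String.ofList pfx])
    else
      let rest1 := if (PySem.Int.floordiv n 2 + 1 - b_used ≠ 0 ∧ g_used < b_used) ∨ (pfx.length : Int) = n - 1 then
          (pfx ++ ['G'], g_used + 1, b_used) :: rest
        else rest
      let rest2 := if PySem.Int.floordiv n 2 - b_used ≠ 0 then
          (pfx ++ ['B'], g_used, b_used + 1) :: rest1
        else rest1
      kidLoop n rest2 results
termination_by (stack.map (kidWt n)).sum
decreasing_by
  · have h1 : 0 < kidWt n (pfx, g_used, b_used) := Nat.pow_pos (by norm_num)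
    simp only [List.map_cons, List.sum_cons]
    omega
  · rename_i hlen
    have hk : (n - (pfx.length : Int)).toNat = (n - ((pfx.length : Int) + 1)).toNat + 1 := by omega
    have hw : kidWt n (pfx, g_used, b_used) = 3 * 3 ^ (n - ((pfx.length : Int) + 1)).toNat := by
      simp [kidWt, hk, pow_succ]; ring
    have hwB : kidWt n (pfx ++ ['B'], g_used, b_used + 1) = 3 ^ (n - ((pfx.length : Int) + 1)).toNat := by
      simp [kidWt]
    have hwG : kidWt n (pfx ++ ['G'], g_used + 1, b_used) = 3 ^ (n - ((pfx.length : Int) + 1)).toNat := by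
      simp [kidWt]
    have hp : 0 < 3 ^ (n - ((pfx.length : Int) + 1)).toNat := Nat.pow_pos (by norm_num)
    split_ifs <;> simp only [List.map_cons, List.sum_cons, hwB, hwG, hw] <;> omega

def kidgenerator_alt (n : Int) : List String := kidLoop n [([], 0, 0)] []

-- ===== PRECONDITION & SPEC =====
def Spec_kidgenerator (n : Int) (out : List String) : Prop := out = kidgenerator_alt n
instance (n : Int) (out : List String) : Decidable (Spec_kidgenerator n out) := by unfold Spec_kidgenerator; infer_instance

-- ===== CLAIM (what is proved, stated in full; the proofs are below) =====
def Claim_equal_kidgenerator : Prop := ∀ (n : Int), Dom_kidgenerator n → Spec_kidgenerator n (kidgenerator n)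

-- ===== LEMMAS AND PROOFS =====

-- recursive description of one DFS expansion; proof-only bridge between kidLoop and A's levels
def expandRec (n : Int) (pfx : List Char) (g_used b_used : Int) : List String :=
  if _h : (pfx.length : Int) ≥ n then [String.ofList pfx]
  else
    (if PySem.Int.floordiv n 2 - b_used ≠ 0 then
        expandRec n (pfx ++ ['B']) g_used (b_used + 1)
      else []) ++
    (if (PySem.Int.floordiv n 2 + 1 - b_used ≠ 0 ∧ g_used < b_used) ∨ (pfx.length : Int) = n - 1 then
        expandRec n (pfx ++ ['G']) (g_used + 1) b_used
      else [])
termination_by (n - pfx.length).toNat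
decreasing_by
  · simp only [List.length_append, List.length_cons, List.length_nil]; omega
  · simp only [List.length_append, List.length_cons, List.length_nil]; omega

theorem kidLoop_eq_flatMap (n : Int) (stack : List (List Char × Int × Int)) (results : List String) :
    kidLoop n stack results =
      results ++ stack.flatMap (fun e => expandRec n e.1 e.2.1 e.2.2) := by
  induction stack, results using kidLoop.induct n with
  | case1 res => simp [kidLoop]
  | case2 res pfx g_used b_used rest hge ih =>
      rw [kidLoop, if_pos hge, ih]
      simp only [List.flatMap_cons]
      rw [expandRec, dif_pos hge]
      simp
  | case3 res pfx g_used b_used rest hge rest1 rest2 ih =>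
      rw [kidLoop, if_neg hge]
      change kidLoop n rest2 res = _
      rw [ih]
      simp only [List.flatMap_cons]
      rw [expandRec, dif_neg hge]
      simp only [rest2, rest1]
      split_ifs <;> simp
-- A's per-possibility children at loop index a, as a list.
def childS (n a : Int) (p : String) : List String :=
  (if PySem.Int.floordiv n 2 - (countusage p).2 ≠ 0 then [p ++ "B"] else []) ++
  (if (PySem.Int.floordiv n 2 + 1 - (countusage p).2 ≠ 0 ∧ (countusage p).1 < (countusage p).2) ∨ a = n - 1 then
      [p ++ "G"]
    else [])

theorem inner_fold_eq (n a : Int) (ps : List String) :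
    ∀ acc : List String,
      ps.foldl
        (fun working possibility =>
          let gb := countusage possibility
          let g_available : Int := PySem.Int.floordiv n 2 + 1 - gb.2
          let b_available : Int := PySem.Int.floordiv n 2 - gb.2
          let working := if b_available ≠ 0 then working ++ [possibility ++ "B"] else working
          if (g_available ≠ 0 ∧ gb.1 < gb.2) ∨ a = n - 1 then working ++ [possibility ++ "G"]
          else working)
        acc = acc ++ ps.flatMap (childS n a) := by
  induction ps with
  | nil => intro acc; simp
  | cons p ps ih =>
      intro acc
      simp only [List.foldl_cons, List.flatMap_cons, ih]
      unfold childS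
      split_ifs <;> simp

theorem countusage_append (p : String) (c : Char) :
    countusage (p ++ String.ofList [c]) =
      if c = 'G' then ((countusage p).1 + 1, (countusage p).2)
      else ((countusage p).1, (countusage p).2 + 1) := by
  simp [countusage, String.toList_append]

theorem toList_append_single (p : String) (c : Char) :
    (p ++ String.ofList [c]).toList = p.toList ++ [c] := by
  simp [String.toList_append]

theorem main_lemma (n : Int) :
    ∀ (k : Nat) (a : Int), a + k = n → ∀ ps : List String, (∀ p ∈ ps, (p.toList.length : Int) = a) →
      (PySem.List.pyRange a n 1).foldl
        (fun possibilities a =>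
          possibilities.foldl
            (fun working possibility =>
              let gb := countusage possibility
              let g_available : Int := PySem.Int.floordiv n 2 + 1 - gb.2
              let b_available : Int := PySem.Int.floordiv n 2 - gb.2
              let working := if b_available ≠ 0 then working ++ [possibility ++ "B"] else working
              if (g_available ≠ 0 ∧ gb.1 < gb.2) ∨ a = n - 1 then working ++ [possibility ++ "G"]
              else working)
            [])
        ps
      = ps.flatMap (fun p => expandRec n p.toList (countusage p).1 (countusage p).2) := by
  intro k
  induction k with
  | zero =>
      intro a ha ps hps
      rw [PySem.List.pyRange_one_eq_nil (by omega)]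
      simp only [List.foldl_nil]
      have : ∀ p ∈ ps, expandRec n p.toList (countusage p).1 (countusage p).2 = [p] := by
        intro p hp
        rw [expandRec]
        rw [dif_pos (by have := hps p hp; omega)]
        simp
      calc ps = ps.flatMap (fun p => [p]) := by simp
        _ = _ := List.flatMap_congr (fun p hp => (this p hp).symm)
  | succ k ih =>
      intro a ha ps hps
      rw [PySem.List.pyRange_one_cons (by omega)]
      simp only [List.foldl_cons]
      rw [inner_fold_eq n a ps []]
      simp only [List.nil_append]
      rw [ih (a + 1) (by omega) (ps.flatMap (childS n a))
        (by
          intro q hq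
          rw [List.mem_flatMap] at hq
          obtain ⟨p, hp, hq⟩ := hq
          have hl := hps p hp
          unfold childS at hq
          rw [List.mem_append] at hq
          rcases hq with hq | hq <;> split_ifs at hq <;> simp only [List.mem_singleton, List.not_mem_nil] at hq <;>
            first
            | exact absurd hq (by simp)
            | (subst hq; rw [toList_append_single]; simp only [List.length_append, List.length_singleton]; push_cast; omega))]
      rw [List.flatMap_assoc]
      apply List.flatMap_congr
      intro p hp
      have hl := hps p hp
      have hB : ("B" : String) = String.ofList ['B'] := rfl
      have hG : ("G" : String) = String.ofList ['G'] := rfl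
      have hcB : countusage (p ++ "B") = ((countusage p).1, (countusage p).2 + 1) := by
        rw [hB, countusage_append]; simp
      have hcG : countusage (p ++ "G") = ((countusage p).1 + 1, (countusage p).2) := by
        rw [hG, countusage_append]; simp
      conv_rhs => rw [expandRec]
      rw [dif_neg (by rw [hl]; omega)]
      unfold childS
      rw [← hl]
      rw [List.flatMap_append]
      split_ifs <;>
        simp [hB, hG, hcB, hcG]

theorem kidgenerator_eq (n : Int) : kidgenerator n = kidgenerator_alt n := by
  unfold kidgenerator kidgenerator_alt
  rw [kidLoop_eq_flatMap]
  by_cases hn : n ≤ 0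
  · rw [PySem.List.pyRange_one_eq_nil (by omega)]
    simp only [List.foldl_nil, List.nil_append, List.flatMap_cons, List.flatMap_nil, List.append_nil]
    rw [expandRec, dif_pos (by simp; omega)]
  · have h := main_lemma n n.toNat 0 (by omega) [""] (by intro p hp; simp at hp; simp [hp])
    rw [h]
    have he : ("" : String).toList = [] := rfl
    simp [countusage, he]

-- ===== VERDICT (by name: the statement is the Claim_ definition above) =====
theorem kidgenerator_spec : Claim_equal_kidgenerator := by
  intro n _
  unfold Spec_kidgenerator
  exact kidgenerator_eq n
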